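-- pv_equiv track=rewrite | github.com/yuliia-ka/advent_code_2025 | aoc_day6.py | column_widths
-- ===== SOURCE A (Python) =====
-- def column_widths(s):
--     widths = []
--     i = 0
--     n = len(s)
--
--     while i < n:
--         if s[i] != " ":
--             j = i + 1
--             while j < n and s[j] == " ":
--                 j += 1
--             widths.append(j - i)  # symbol + trailing spaces
--             i = j
--         else:
--             i += 1
--
--     return widths
-- ===== SOURCE B (Python) =====
-- def column_widths(s):
--     n = len(s)
--     pos = [i for i, c in enumerate(s) if c != " "]
--     if not pos:
--         return []
--     return [b - a for a, b in zip(pos, pos[1:])] + [n - pos[-1]]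
-- ===== Notes on version B (the rewrite author's own statement) =====
-- stated objective: alternative
-- what changed: Replaces the nested while-loops (outer index scan with an inner scan-ahead over trailing spaces) by two flat passes: collect the indices of all non-space characters, then emit the gaps between consecutive indices plus n - last_index.
import Mathlib
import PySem

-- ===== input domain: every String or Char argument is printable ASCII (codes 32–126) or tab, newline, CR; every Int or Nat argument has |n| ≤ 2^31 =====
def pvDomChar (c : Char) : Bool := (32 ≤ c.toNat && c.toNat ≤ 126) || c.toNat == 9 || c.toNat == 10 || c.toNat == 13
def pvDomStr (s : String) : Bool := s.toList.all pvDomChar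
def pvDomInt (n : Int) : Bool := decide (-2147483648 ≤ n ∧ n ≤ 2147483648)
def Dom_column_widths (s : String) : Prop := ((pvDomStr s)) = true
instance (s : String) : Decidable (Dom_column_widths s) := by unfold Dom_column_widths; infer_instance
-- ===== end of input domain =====

-- B replaces A's nested scan-ahead loops by two flat passes (index list, then gap differences); same cost, different decomposition.

-- ===== PORT A =====
-- inner while loop of A: number of leading spaces of the remaining characters (j - i - 1)
def pvCountSp : List Char → Nat
  | [] => 0
  | c :: r => if c = ' ' then pvCountSp r + 1 else 0

-- outer while loop of A on the remaining characters
def pvGoA : List Char → List Int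
  | [] => []
  | c :: r =>
    if c ≠ ' ' then
      ((1 + pvCountSp r : Nat) : Int) :: pvGoA (r.drop (pvCountSp r))
    else
      pvGoA r
termination_by cs => cs.length
decreasing_by
  · simp only [List.length_drop, List.length_cons]; omega
  · simp

def column_widths (s : String) : List Int := pvGoA s.toList

-- ===== PORT B =====
def column_widths_alt (s : String) : List Int :=
  let cs := s.toList
  let n : Int := cs.length
  let pos : List Int := ((PySem.List.enumerate cs 0).filter (fun p => p.2 ≠ ' ')).map (fun p => p.1)
  match pos with
  | [] => []
  | _ :: _ => ((pos.zip (pos.drop 1)).map (fun q => q.2 - q.1)) ++ [n - PySem.List.pyGetD pos (-1) 0]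

-- ===== PRECONDITION & SPEC =====
def Spec_column_widths (s : String) (out : List Int) : Prop := out = column_widths_alt s
instance (s : String) (out : List Int) : Decidable (Spec_column_widths s out) := by unfold Spec_column_widths; infer_instance

-- ===== CLAIM (what is proved, stated in full; the proofs are below) =====
def Claim_equal_column_widths : Prop := ∀ (s : String), Dom_column_widths s → Spec_column_widths s (column_widths s)

-- ===== LEMMAS AND PROOFS =====

theorem pvCountSp_le (r : List Char) : pvCountSp r ≤ r.length := by
  induction r with
  | nil => simp [pvCountSp]
  | cons c t ih => simp only [pvCountSp, List.length_cons]; split <;> omega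

-- indices of the non-space characters of cs, starting at offset i
def pvPos : List Char → Int → List Int
  | [], _ => []
  | c :: r, i => if c ≠ ' ' then i :: pvPos r (i + 1) else pvPos r (i + 1)

theorem pvPos_eq (cs : List Char) (i : Int) :
    ((PySem.List.enumerate cs i).filter (fun p => p.2 ≠ ' ')).map (fun p => p.1) = pvPos cs i := by
  induction cs generalizing i with
  | nil => simp [PySem.List.enumerate_nil, pvPos]
  | cons c r ih =>
    rw [PySem.List.enumerate_cons]
    by_cases h : c = ' ' <;> simp only [pvPos, List.filter_cons] <;>
      simp [h] <;> simpa using ih (i + 1)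

-- the consecutive-gaps pass, in recursive form
def pvGaps : List Int → Int → List Int
  | [], _ => []
  | [a], n => [n - a]
  | a :: b :: t, n => (b - a) :: pvGaps (b :: t) n

theorem pvGaps_impl (p : List Int) (n : Int) (h : p ≠ []) :
    ((p.zip (p.drop 1)).map (fun q => q.2 - q.1)) ++ [n - PySem.List.pyGetD p (-1) 0] = pvGaps p n := by
  induction p with
  | nil => simp at h
  | cons a t ih =>
    cases t with
    | nil =>
      rw [PySem.List.pyGetD_neg_one (xs := [a]) (h := by simp)]
      simp [pvGaps]
    | cons b u =>
      have htail := ih (by simp)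
      rw [PySem.List.pyGetD_neg_one (xs := b :: u) (h := by simp)] at htail
      rw [PySem.List.pyGetD_neg_one (xs := a :: b :: u) (h := by simp)]
      rw [List.getLast_cons (by simp)]
      simp only [List.drop_one, List.tail_cons, List.zip_cons_cons, List.map_cons, pvGaps,
        List.cons_append]
      congr 1

theorem pvPos_drop_sp (r : List Char) (i : Int) :
    pvPos r i = pvPos (r.drop (pvCountSp r)) (i + pvCountSp r) := by
  induction r generalizing i with
  | nil => simp [pvCountSp]
  | cons c t ih =>
    by_cases h : c = ' '
    · have hc : pvCountSp (c :: t) = pvCountSp t + 1 := by simp [pvCountSp, h]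
      rw [hc]
      have hp : pvPos (c :: t) i = pvPos t (i + 1) := by
        simp [pvPos, h]
      rw [hp, ih (i + 1), List.drop_succ_cons]
      congr 1
      push_cast; ring
    · have hc : pvCountSp (c :: t) = 0 := by simp [pvCountSp, h]
      rw [hc]
      simp

theorem pvDrop_sp_head (r : List Char) :
    ∀ c t, r.drop (pvCountSp r) = c :: t → c ≠ ' ' := by
  induction r with
  | nil => intro c t h; simp at h
  | cons a u ih =>
    intro c t h
    by_cases ha : a = ' '
    · have hc : pvCountSp (a :: u) = pvCountSp u + 1 := by simp [pvCountSp, ha]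
      rw [hc, List.drop_succ_cons] at h
      exact ih c t h
    · have hc : pvCountSp (a :: u) = 0 := by simp [pvCountSp, ha]
      rw [hc, List.drop_zero] at h
      cases h
      exact ha

theorem pvMain (cs : List Char) (i : Int) :
    pvGoA cs = pvGaps (pvPos cs i) (i + cs.length) := by
  match cs with
  | [] => simp [pvGoA, pvPos, pvGaps]
  | c :: r =>
    by_cases h : c = ' '
    · rw [pvGoA, if_neg (by simp [h])]
      have hp : pvPos (c :: r) i = pvPos r (i + 1) := by simp [pvPos, h]
      rw [hp, pvMain r (i + 1)]
      congr 1
      simp only [List.length_cons]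
      push_cast; ring
    · rw [pvGoA, if_pos h]
      have hpos : pvPos (c :: r) i = i :: pvPos (r.drop (pvCountSp r)) (i + 1 + pvCountSp r) := by
        rw [show pvPos (c :: r) i = i :: pvPos r (i + 1) by simp [pvPos, h],
          pvPos_drop_sp r (i + 1)]
      rw [hpos]
      have hk := pvCountSp_le r
      cases hd : r.drop (pvCountSp r) with
      | nil =>
        have hlen : pvCountSp r = r.length := by
          have := congrArg List.length hd
          simp only [List.length_drop, List.length_nil] at this
          omega
        simp only [pvPos, pvGaps, pvGoA, List.length_cons]
        congr 1
        push_cast [hlen]; ring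
      | cons d t =>
        have hd' : d ≠ ' ' := pvDrop_sp_head r d t hd
        have hlr : t.length + 1 = r.length - pvCountSp r := by
          have := congrArg List.length hd
          simp only [List.length_drop, List.length_cons] at this
          omega
        rw [pvMain (d :: t) (i + 1 + pvCountSp r)]
        have hpd : pvPos (d :: t) (i + 1 + pvCountSp r)
            = (i + 1 + (pvCountSp r : Int)) :: pvPos t (i + 1 + pvCountSp r + 1) := by
          simp [pvPos, hd']
        rw [hpd, pvGaps]
        have h1 : (i + 1 + (pvCountSp r : Int)) - i = ((1 + pvCountSp r : Nat) : Int) := by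
          push_cast; ring
        rw [h1, ← hpd]
        have hn : i + 1 + (pvCountSp r : Int) + ((d :: t).length : Int)
            = i + ((c :: r).length : Int) := by
          simp only [List.length_cons]; push_cast; omega
        rw [hn]
termination_by cs.length
decreasing_by
  · simp
  · have := congrArg List.length hd
    have := pvCountSp_le r
    simp only [List.length_drop, List.length_cons] at *
    omega

theorem pvAlt_eq (s : String) :
    column_widths_alt s = pvGaps (pvPos s.toList 0) s.toList.length := by
  simp only [column_widths_alt, pvPos_eq]
  cases hp : pvPos s.toList 0 with
  | nil => simp [pvGaps]
  | cons a t => exact pvGaps_impl _ _ (by simp)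

-- ===== VERDICT (by name: the statement is the Claim_ definition above) =====
theorem column_widths_spec : Claim_equal_column_widths := by
  intro s _
  unfold Spec_column_widths column_widths
  rw [pvAlt_eq, pvMain s.toList 0]
  congr 1
  omega
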